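-- pv_equiv track=rewrite | github.com/theRealestAEP/open-geospy | scripts/sync_pgvector_to_lancedb.py | _choose_num_sub_vectors
-- ===== SOURCE A (Python) =====
-- def _choose_num_sub_vectors(embedding_dim: int, requested: int = 0) -> int:
--     dim = max(1, int(embedding_dim))
--     req = int(requested or 0)
--     if req > 0:
--         if dim % req != 0:
--             raise ValueError(
--                 f"Requested num_sub_vectors={req} does not divide embedding_dim={dim}"
--             )
--         return req
--     # Prefer Lance default if valid; otherwise pick the largest common divisor <= 96.
--     if dim % 96 == 0:
--         return 96
--     for candidate in range(min(95, dim), 1, -1):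
--         if dim % candidate == 0:
--             return candidate
--     return 1
-- ===== SOURCE B (Python) =====
-- def _choose_num_sub_vectors(embedding_dim: int, requested: int = 0) -> int:
--     dim = max(1, int(embedding_dim))
--     req = int(requested or 0)
--     if req > 0:
--         if dim % req != 0:
--             raise ValueError(
--                 f"Requested num_sub_vectors={req} does not divide embedding_dim={dim}"
--             )
--         return req
--     # Enumerate every divisor of dim by sqrt pairing (i and dim // i) and keep
--     # the largest one <= 96; this subsumes A's 96 check, candidate scan and fallback 1.
--     best = 1
--     i = 1
--     while i * i <= dim:
--         if dim % i == 0: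
--             if i <= 96 and i > best:
--                 best = i
--             j = dim // i
--             if j <= 96 and j > best:
--                 best = j
--         i += 1
--     return best
-- ===== Notes on version B (the rewrite author's own statement) =====
-- stated objective: alternative
-- what changed: The auto-pick no longer tests candidates 96,95..2 for divisibility: B enumerates all divisors of dim by sqrt pairing (i and dim//i for i*i <= dim) and keeps the largest divisor <= 96, subsuming A's special 96 check and the fallback 1; the requested-divisor validation branch is unchanged.
import Mathlib
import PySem

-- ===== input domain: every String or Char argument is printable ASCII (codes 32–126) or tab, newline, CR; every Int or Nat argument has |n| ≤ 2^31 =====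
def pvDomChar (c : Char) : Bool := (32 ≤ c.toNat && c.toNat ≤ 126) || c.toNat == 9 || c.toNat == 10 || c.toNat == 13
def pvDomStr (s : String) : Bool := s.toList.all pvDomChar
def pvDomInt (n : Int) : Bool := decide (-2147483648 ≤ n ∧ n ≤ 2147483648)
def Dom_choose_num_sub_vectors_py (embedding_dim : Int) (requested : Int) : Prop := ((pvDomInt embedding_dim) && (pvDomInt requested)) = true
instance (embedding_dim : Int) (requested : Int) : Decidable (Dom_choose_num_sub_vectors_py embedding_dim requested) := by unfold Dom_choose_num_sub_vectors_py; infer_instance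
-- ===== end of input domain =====

-- B replaces the descending candidate scan (with its special 96 check and fallback 1) by an
-- enumeration of all divisors of dim via sqrt pairing, keeping the largest <= 96; objective: alternative.

-- ===== PORT A =====
def choose_num_sub_vectors_py (embedding_dim : Int) (requested : Int) : Int :=
  let dim := max 1 embedding_dim
  let req := requested  -- int(requested or 0) = requested
  if 0 < req then
    req  -- when dim % req ≠ 0 the Python raises ValueError; Pre_ excludes those inputs
  else if PySem.Int.mod dim 96 = 0 then 96
  else
    -- for candidate in range(min(95, dim), 1, -1): early return on the first divisor
    match (PySem.List.pyRange (min 95 dim) 1 (-1)).find? (fun c => PySem.Int.mod dim c == 0) with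
    | some candidate => candidate
    | none => 1

-- ===== PORT B =====
-- while i * i <= dim: if dim % i == 0: consider i and dim // i as divisors; i += 1
def pvPairScan (dim : Int) (i : Int) (best : Int) : Int :=
  if h : i * i ≤ dim then
    let b1 :=
      if PySem.Int.mod dim i = 0 then
        let b := if i ≤ 96 ∧ best < i then i else best
        let j := PySem.Int.floordiv dim i
        if j ≤ 96 ∧ b < j then j else b
      else best
    pvPairScan dim (i + 1) b1
  else best
termination_by (dim + 1 - i).toNat
decreasing_by
  have hi : i ≤ dim := by nlinarith [sq_nonneg i, sq_nonneg (i - 1)]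
  omega

def choose_num_sub_vectors_py_alt (embedding_dim : Int) (requested : Int) : Int :=
  let dim := max 1 embedding_dim
  let req := requested  -- int(requested or 0) = requested
  if 0 < req then
    req  -- when dim % req ≠ 0 the Python raises ValueError; Pre_ excludes those inputs
  else
    pvPairScan dim 1 1

-- ===== PRECONDITION & SPEC =====
-- Pre_ excludes exactly the inputs on which A raises ValueError: a positive requested that does
-- not divide max(1, embedding_dim).
def Pre_choose_num_sub_vectors_py (embedding_dim : Int) (requested : Int) : Prop :=
  0 < requested → PySem.Int.mod (max 1 embedding_dim) requested = 0
instance (embedding_dim : Int) (requested : Int) : Decidable (Pre_choose_num_sub_vectors_py embedding_dim requested) := by unfold Pre_choose_num_sub_vectors_py; infer_instance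
def pvWitness_choose_num_sub_vectors_py : Int × Int := (768, 0)
def Spec_choose_num_sub_vectors_py (embedding_dim : Int) (requested : Int) (out : Int) : Prop := out = choose_num_sub_vectors_py_alt embedding_dim requested
instance (embedding_dim : Int) (requested : Int) (out : Int) : Decidable (Spec_choose_num_sub_vectors_py embedding_dim requested out) := by unfold Spec_choose_num_sub_vectors_py; infer_instance

-- ===== CLAIM (what is proved, stated in full; the proofs are below) =====
def Claim_equal_choose_num_sub_vectors_py : Prop := ∀ (embedding_dim : Int) (requested : Int), Dom_choose_num_sub_vectors_py embedding_dim requested → Pre_choose_num_sub_vectors_py embedding_dim requested → Spec_choose_num_sub_vectors_py embedding_dim requested (choose_num_sub_vectors_py embedding_dim requested)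

-- ===== LEMMAS AND PROOFS =====

-- A's descending scan (with fallback 1): its result divides dim, lies in [1, max 1 m], and is
-- maximal among divisors of dim in (1, m].
theorem pvAfind_spec (dim : Int) (n : Nat) :
    ∀ m : Int, m ≤ 1 + n →
      (match (PySem.List.pyRange m 1 (-1)).find? (fun c => PySem.Int.mod dim c == 0) with
        | some candidate => candidate
        | none => 1) ∣ dim ∧
      1 ≤ (match (PySem.List.pyRange m 1 (-1)).find? (fun c => PySem.Int.mod dim c == 0) with
        | some candidate => candidate
        | none => 1) ∧
      (match (PySem.List.pyRange m 1 (-1)).find? (fun c => PySem.Int.mod dim c == 0) with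
        | some candidate => candidate
        | none => 1) ≤ max 1 m ∧
      ∀ e : Int, 1 < e → e ≤ m → e ∣ dim →
        e ≤ (match (PySem.List.pyRange m 1 (-1)).find? (fun c => PySem.Int.mod dim c == 0) with
          | some candidate => candidate
          | none => 1) := by
  induction n with
  | zero =>
    intro m hm
    rw [PySem.List.pyRange_neg_one_eq_nil (by omega : m ≤ 1)]
    simp only [List.find?_nil]
    refine ⟨one_dvd _, le_refl _, le_max_left _ _, ?_⟩
    intro e he hem _
    omega
  | succ n ih =>
    intro m hm
    by_cases h1 : m ≤ 1
    · rw [PySem.List.pyRange_neg_one_eq_nil h1]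
      simp only [List.find?_nil]
      refine ⟨one_dvd _, le_refl _, le_max_left _ _, ?_⟩
      intro e he hem _
      omega
    · rw [PySem.List.pyRange_neg_one_cons (by omega : 1 < m)]
      by_cases hp : PySem.Int.mod dim m = 0
      · rw [List.find?_cons_of_pos (by simpa using hp)]
        exact ⟨(PySem.Int.mod_eq_zero_iff_dvd dim m).mp hp, (by omega : (1:Int) ≤ m),
          le_max_right 1 m, fun e _ hem _ => hem⟩
      · rw [List.find?_cons_of_neg (by simpa using hp)]
        obtain ⟨hdvd, hge, hle, hmax⟩ := ih (m - 1) (by omega)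
        refine ⟨hdvd, hge, by omega, ?_⟩
        intro e he hem hedvd
        rcases eq_or_lt_of_le hem with heq | hlt
        · rw [heq] at hedvd
          exact absurd ((PySem.Int.mod_eq_zero_iff_dvd dim m).mpr hedvd) hp
        · exact hmax e he (by omega) hedvd

-- exact floor division of a factor pair
theorem pvFloordiv_pair (d c dim : Int) (hd : 1 ≤ d) (h : d * c = dim) :
    PySem.Int.floordiv dim d = c := by
  rw [PySem.Int.floordiv_eq_ediv_of_pos (by omega)]
  subst h
  rw [mul_comm]
  exact Int.mul_ediv_cancel c (by omega)

-- B's sqrt pairing scan: invariant-based characterisation.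
theorem pvPairScan_spec (dim : Int) (hdim : 1 ≤ dim) : ∀ (n : Nat) (i best : Int),
    (dim + 1 - i).toNat ≤ n → 1 ≤ i → best ∣ dim → 1 ≤ best → best ≤ 96 →
    (∀ d c : Int, d * c = dim → 1 ≤ d → 1 ≤ c → d ≤ 96 → (d < i ∨ c < i) → d ≤ best) →
    pvPairScan dim i best ∣ dim ∧ 1 ≤ pvPairScan dim i best ∧ pvPairScan dim i best ≤ 96 ∧
    (∀ d c : Int, d * c = dim → 1 ≤ d → 1 ≤ c → d ≤ 96 → d ≤ pvPairScan dim i best) := by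
  intro n
  induction n with
  | zero =>
    intro i best hfuel hi hbdvd hb1 hb96 hinv
    have hgt : dim < i := by omega
    rw [pvPairScan, dif_neg (by nlinarith)]
    refine ⟨hbdvd, hb1, hb96, ?_⟩
    intro d c hdc hd hc hd96
    exact hinv d c hdc hd hc hd96 (Or.inl (by nlinarith))
  | succ n ih =>
    intro i best hfuel hi hbdvd hb1 hb96 hinv
    by_cases h : i * i ≤ dim
    · have hile : i ≤ dim := by nlinarith [sq_nonneg (i - 1)]
      rw [pvPairScan, dif_pos h]
      by_cases hm : PySem.Int.mod dim i = 0
      · -- i divides dim: both i and dim // i are considered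
        obtain ⟨c, hc⟩ := (PySem.Int.mod_eq_zero_iff_dvd dim i).mp hm
        have hc1 : 1 ≤ c := by nlinarith
        have hj : PySem.Int.floordiv dim i = c := pvFloordiv_pair i c dim hi (by omega)
        rw [if_pos hm]
        simp only [hj]
        have hcdvd : c ∣ dim := ⟨i, by rw [hc]; ring⟩
        -- a step lemma: any new best dominating best, i (if ≤ 96) and c (if ≤ 96)
        -- satisfies the invariant at i + 1
        have hstep : ∀ b2 : Int, best ≤ b2 → (i ≤ 96 → i ≤ b2) → (c ≤ 96 → c ≤ b2) →
            ∀ d c' : Int, d * c' = dim → 1 ≤ d → 1 ≤ c' → d ≤ 96 →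
              (d < i + 1 ∨ c' < i + 1) → d ≤ b2 := by
          intro b2 hb hib hcb d c' hdc hd hc' hd96 hcase
          by_cases hold : d < i ∨ c' < i
          · exact le_trans (hinv d c' hdc hd hc' hd96 hold) hb
          · rcases (by omega : d = i ∨ c' = i) with heq | heq
            · have := hib (by omega)
              omega
            · have h3 : i * d = i * c := by
                rw [mul_comm i d]
                rw [heq] at hdc
                omega
              have hdq : d = c := mul_left_cancel₀ (by omega : i ≠ 0) h3
              have := hcb (by omega)
              omega
        by_cases h1 : i ≤ 96 ∧ best < i
        · rw [if_pos h1]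
          by_cases h2 : c ≤ 96 ∧ i < c
          · rw [if_pos h2]
            exact ih (i + 1) c (by omega) (by omega) hcdvd (by omega) (by omega)
              (hstep c (by omega) (by omega) (by omega))
          · rw [if_neg h2]
            exact ih (i + 1) i (by omega) (by omega) ⟨c, hc⟩ (by omega) (by omega)
              (hstep i (by omega) (by omega) (by omega))
        · rw [if_neg h1]
          by_cases h2 : c ≤ 96 ∧ best < c
          · rw [if_pos h2]
            exact ih (i + 1) c (by omega) (by omega) hcdvd (by omega) (by omega)
              (hstep c (by omega) (by omega) (by omega))
          · rw [if_neg h2]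
            exact ih (i + 1) best (by omega) (by omega) hbdvd (by omega) (by omega)
              (hstep best (by omega) (by omega) (by omega))
      · -- i does not divide dim: best unchanged
        rw [if_neg hm]
        refine ih (i + 1) best (by omega) (by omega) hbdvd hb1 hb96 ?_
        intro d c hdc hd hc hd96 hcase
        by_cases hold : d < i ∨ c < i
        · exact hinv d c hdc hd hc hd96 hold
        · exfalso
          rcases (by omega : d = i ∨ c = i) with rfl | rfl
          · exact hm ((PySem.Int.mod_eq_zero_iff_dvd dim d).mpr ⟨c, by rw [← hdc]⟩)
          · exact hm ((PySem.Int.mod_eq_zero_iff_dvd dim c).mpr ⟨d, by rw [← hdc]; ring⟩)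
    · rw [pvPairScan, dif_neg h]
      refine ⟨hbdvd, hb1, hb96, ?_⟩
      intro d c hdc hd hc hd96
      have hcase : d < i ∨ c < i := by
        by_contra hno
        simp only [not_or, not_lt] at hno
        nlinarith [hno.1, hno.2]
      exact hinv d c hdc hd hc hd96 hcase

-- ===== VERDICT (by name: the statement is the Claim_ definition above) =====
theorem choose_num_sub_vectors_py_spec : Claim_equal_choose_num_sub_vectors_py := by
  intro embedding_dim requested _ hpre
  unfold Spec_choose_num_sub_vectors_py choose_num_sub_vectors_py choose_num_sub_vectors_py_alt
  simp only []
  set dim := max 1 embedding_dim with hdimdef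
  have hdim : 1 ≤ dim := le_max_left _ _
  by_cases hreq : 0 < requested
  · rw [if_pos hreq, if_pos hreq]
  · rw [if_neg hreq, if_neg hreq]
    obtain ⟨hBdvd, hBge, hBle, hBmax⟩ :=
      pvPairScan_spec dim hdim (dim.toNat) 1 1 (by omega) le_rfl (one_dvd _) le_rfl (by norm_num)
        (by intro d c _ _ _ _ hcase; omega)
    set rB := pvPairScan dim 1 1 with hrB
    obtain ⟨cB, hcB⟩ := hBdvd
    have hcB1 : 1 ≤ cB := by nlinarith
    by_cases h96 : PySem.Int.mod dim 96 = 0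
    · rw [if_pos h96]
      obtain ⟨c, hc⟩ := (PySem.Int.mod_eq_zero_iff_dvd dim 96).mp h96
      have hc1 : 1 ≤ c := by nlinarith
      have := hBmax 96 c (by omega) (by norm_num) hc1 (by norm_num)
      omega
    · rw [if_neg h96]
      obtain ⟨hAdvd, hAge, hAle, hAmax⟩ := pvAfind_spec dim 94 (min 95 dim) (by omega)
      set rA := (match (PySem.List.pyRange (min 95 dim) 1 (-1)).find? (fun c => PySem.Int.mod dim c == 0) with
        | some candidate => candidate
        | none => 1) with hrA
      have hAleB : rA ≤ rB := by
        obtain ⟨cA, hcA⟩ := hAdvd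
        have hcA1 : 1 ≤ cA := by nlinarith
        exact hBmax rA cA (by omega) (by omega) hcA1 (by omega)
      have hBleA : rB ≤ rA := by
        have hB96 : rB ≠ 96 := by
          intro hEq
          exact h96 ((PySem.Int.mod_eq_zero_iff_dvd dim 96).mpr (hEq ▸ ⟨cB, hcB⟩))
        have hBdim : rB ≤ dim := Int.le_of_dvd (by omega) ⟨cB, hcB⟩
        rcases eq_or_lt_of_le hBge with h1 | h2
        · omega
        · exact hAmax rB (by omega) (by omega) ⟨cB, hcB⟩
      omega
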